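-- pv_equiv track=rewrite | github.com/PossumXI/Asgard_Arobi | Giru/Giru(jarvis)/backend/giru_server.py | contains_wake_word
-- ===== SOURCE A (Python) =====
-- WAKE_WORDS = ["giru", "hey giru", "hello giru", "hi giru", "okay giru"]
--
-- def normalize_text(text: str) -> str:
--     return " ".join(text.lower().strip().split())
--
-- def contains_wake_word(transcript: str) -> tuple[bool, str]:
--     normalized = normalize_text(transcript)
--     for wake_word in WAKE_WORDS:
--         if wake_word in normalized:
--             idx = normalized.find(wake_word)
--             remaining = normalized[idx + len(wake_word):].strip()
--             return True, remaining
--     return False, ""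
-- ===== SOURCE B (Python) =====
-- def normalize_text(text: str) -> str:
--     return " ".join(text.lower().strip().split())
--
-- def contains_wake_word(transcript: str) -> tuple[bool, str]:
--     # Every WAKE_WORDS entry contains "giru", and "giru" is checked first,
--     # so a single substring search suffices: no table scan.
--     normalized = normalize_text(transcript)
--     idx = normalized.find("giru")
--     if idx == -1:
--         return False, ""
--     return True, normalized[idx + 4:].strip()
-- ===== Notes on version B (the rewrite author's own statement) =====
-- stated objective: simpler
-- what changed: Dropped the loop over the WAKE_WORDS table: since every wake word contains 'giru' and 'giru' is tested first, a single find('giru') determines both the match and the remainder slice.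
import Mathlib
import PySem

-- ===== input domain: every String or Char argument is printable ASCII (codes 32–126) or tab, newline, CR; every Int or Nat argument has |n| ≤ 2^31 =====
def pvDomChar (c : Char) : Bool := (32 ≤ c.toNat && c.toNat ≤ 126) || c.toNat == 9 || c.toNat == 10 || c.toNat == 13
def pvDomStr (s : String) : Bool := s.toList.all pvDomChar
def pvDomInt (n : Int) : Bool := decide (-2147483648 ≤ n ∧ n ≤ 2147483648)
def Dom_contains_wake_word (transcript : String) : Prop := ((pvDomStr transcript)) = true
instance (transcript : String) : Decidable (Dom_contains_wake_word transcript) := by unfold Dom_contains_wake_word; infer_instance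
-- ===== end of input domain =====

-- B replaces A's loop over WAKE_WORDS with one find("giru"): every wake word
-- contains "giru" and "giru" is tested first, so the loop always decides there.
-- ===== PORT A =====
def normalize_text (text : String) : String :=
  PySem.Str.join " " (PySem.Str.split₀ (PySem.Str.strip (PySem.Str.lower text)))

def WAKE_WORDS : List String := ["giru", "hey giru", "hello giru", "hi giru", "okay giru"]

def cww_loop (normalized : String) : List String → Bool × String
  | [] => (false, "")
  | wake_word :: rest =>
    if PySem.Str.isIn wake_word normalized then
      let idx := PySem.Str.find normalized wake_word
      let remaining := PySem.Str.strip
        (PySem.Str.slice normalized (some (idx + (PySem.Str.len wake_word : Int))) none)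
      (true, remaining)
    else cww_loop normalized rest

def contains_wake_word (transcript : String) : Bool × String :=
  cww_loop (normalize_text transcript) WAKE_WORDS

-- ===== PORT B =====
def contains_wake_word_alt (transcript : String) : Bool × String :=
  let normalized := normalize_text transcript
  let idx := PySem.Str.find normalized "giru"
  if idx = -1 then (false, "")
  else (true, PySem.Str.strip (PySem.Str.slice normalized (some (idx + 4)) none))

-- ===== PRECONDITION & SPEC =====
def Spec_contains_wake_word (transcript : String) (out : Bool × String) : Prop := out = contains_wake_word_alt transcript
instance (transcript : String) (out : Bool × String) : Decidable (Spec_contains_wake_word transcript out) := by unfold Spec_contains_wake_word; infer_instance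

-- ===== CLAIM (what is proved, stated in full; the proofs are below) =====
def Claim_equal_contains_wake_word : Prop := ∀ (transcript : String), Dom_contains_wake_word transcript → Spec_contains_wake_word transcript (contains_wake_word transcript)

-- ===== LEMMAS AND PROOFS =====

-- if "giru" is not a substring of n, no wake word is (each has "giru" as an infix)
lemma no_giru_no_wake (n : String) (h : PySem.Str.isIn "giru" n = false) :
    ∀ w ∈ WAKE_WORDS, PySem.Str.isIn w n = false := by
  intro w hw
  rw [Bool.eq_false_iff]
  intro htrue
  rw [PySem.Str.isIn_iff_infix] at htrue
  rw [Bool.eq_false_iff] at h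
  exact h (by
    rw [PySem.Str.isIn_iff_infix]
    exact List.IsInfix.trans (by fin_cases hw <;> decide) htrue)

-- A's loop on the full table equals B's single find, for any string n
lemma loop_eq_find (n : String) :
    cww_loop n WAKE_WORDS =
      (if PySem.Str.find n "giru" = -1 then (false, "")
       else (true, PySem.Str.strip
         (PySem.Str.slice n (some (PySem.Str.find n "giru" + 4)) none))) := by
  by_cases h : PySem.Str.isIn "giru" n = true
  · have hfind : ¬ PySem.Str.find n "giru" = -1 :=
      (PySem.Str.find_ne_neg_one_iff n "giru").mpr ((PySem.Str.isIn_iff_infix "giru" n).mp h)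
    rw [if_neg hfind]
    show (if PySem.Str.isIn "giru" n then _ else _) = _
    rw [if_pos h]
    have hlen : (PySem.Str.len "giru" : Int) = 4 := by decide
    rw [hlen]
  · have h' : PySem.Str.isIn "giru" n = false := Bool.eq_false_iff.mpr h
    have hfind : PySem.Str.find n "giru" = -1 := by
      rw [PySem.Str.find_eq_neg_one_iff]
      intro hinf
      exact h ((PySem.Str.isIn_iff_infix "giru" n).mpr hinf)
    rw [if_pos hfind]
    have hall := no_giru_no_wake n h'
    show (if PySem.Str.isIn "giru" n then _ else _) = _
    rw [if_neg (by simpa using hall "giru" (by simp [WAKE_WORDS]))]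
    show (if PySem.Str.isIn "hey giru" n then _ else _) = _
    rw [if_neg (by simpa using hall "hey giru" (by simp [WAKE_WORDS]))]
    show (if PySem.Str.isIn "hello giru" n then _ else _) = _
    rw [if_neg (by simpa using hall "hello giru" (by simp [WAKE_WORDS]))]
    show (if PySem.Str.isIn "hi giru" n then _ else _) = _
    rw [if_neg (by simpa using hall "hi giru" (by simp [WAKE_WORDS]))]
    show (if PySem.Str.isIn "okay giru" n then _ else _) = _
    rw [if_neg (by simpa using hall "okay giru" (by simp [WAKE_WORDS]))]
    rfl

-- ===== VERDICT (by name: the statement is the Claim_ definition above) =====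
theorem contains_wake_word_spec : Claim_equal_contains_wake_word := by
  intro t _
  show cww_loop (normalize_text t) WAKE_WORDS = contains_wake_word_alt t
  rw [loop_eq_find]
  rfl
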